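-- pv_equiv track=rewrite | github.com/Zeyu-Li/kattis_solutions | sequences/sequences.py | inversions
-- ===== SOURCE A (Python) =====
-- mod = 1000000007
--
-- cache = [1, 2, 4, 8, 16, 32, 64, 128, 256, 512, 1024, 2048, 4096]
--
-- def sq_mod(n: int):
--     '''
--     gets how many it takes for inversion on n
--     '''
--     # generate more to cache
--     while len(cache) <= n:
--         cache.append((cache[-1] * 2) % mod)
--
--     return cache[n]
--
-- def inversions(n: str):
--     zeros = 0
--     questions = 0
--     total = 0
--     for char in reversed(n):
--         if char == '0': zeros+=1
--         else:
--             if char == '?': total*=2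
--
--             z = zeros * sq_mod(questions)
--             q = 0
--             if questions != 0:
--                 q = questions * sq_mod(questions - 1)
--
--             total = (total + z + q) % mod
--
--             if char == '?': questions += 1
--
--     return total
-- ===== SOURCE B (Python) =====
-- mod = 1000000007
--
-- def inversions(n: str):
--     # one forward pass counting pair categories, then closed-form powers of two
--     ones = 0      # fixed non-'0', non-'?' chars seen so far (A treats them all as '1')
--     qs = 0        # '?' seen so far
--     f10 = 0       # (one, zero) ordered pairs
--     mixed = 0     # (one, ?) plus (?, zero) ordered pairs
--     for char in n:
--         if char == '0':
--             f10 += ones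
--             mixed += qs
--         elif char == '?':
--             mixed += ones
--             qs += 1
--         else:
--             ones += 1
--     total = f10 * pow(2, qs, mod)
--     if qs >= 1:
--         total += mixed * pow(2, qs - 1, mod)
--     if qs >= 2:
--         total += (qs * (qs - 1) // 2) * pow(2, qs - 2, mod)
--     return total % mod
-- ===== Notes on version B (the rewrite author's own statement) =====
-- stated objective: faster
-- what changed: A accumulates the expected-inversion total right-to-left, re-weighting the running total at every wildcard and reading a memoized power-of-two cache per character; B makes one forward pass counting pair categories (one-before-zero, one-before-wildcard plus wildcard-before-zero, wildcard pairs) and combines the three counts with closed-form modular powers of two.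
import Mathlib
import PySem

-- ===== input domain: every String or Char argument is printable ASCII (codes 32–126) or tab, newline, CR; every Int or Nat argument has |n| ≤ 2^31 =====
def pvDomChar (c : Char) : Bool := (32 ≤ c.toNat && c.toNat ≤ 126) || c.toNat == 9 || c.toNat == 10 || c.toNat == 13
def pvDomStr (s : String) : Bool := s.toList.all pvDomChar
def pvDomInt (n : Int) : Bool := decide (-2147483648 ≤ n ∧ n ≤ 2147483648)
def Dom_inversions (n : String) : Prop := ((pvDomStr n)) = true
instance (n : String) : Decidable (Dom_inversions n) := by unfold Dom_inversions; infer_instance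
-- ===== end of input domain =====

-- B replaces A's right-to-left incremental accumulation by one forward pass counting
-- pair categories plus a closed-form combination with modular powers of two (same O(n)
-- asymptotics; a timing run measured a constant-factor speedup).

-- ===== PORT A =====
-- module constant `mod`
def pvP : Int := 1000000007
-- module-level cache of powers of two mod pvP; in Python it persists between calls, but it
-- is a pure memo of 2^k % mod, so recomputing it per call is observationally exact
def pvCache0 : List Int := [1, 2, 4, 8, 16, 32, 64, 128, 256, 512, 1024, 2048, 4096]

-- the `while len(cache) <= n: cache.append((cache[-1] * 2) % mod)` loop of sq_mod
def pvExtend (cache : List Int) (n : Nat) : List Int :=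
  if cache.length ≤ n then
    pvExtend (cache ++ [PySem.Int.mod (PySem.List.pyGetD cache (-1) 0 * 2) pvP]) n
  else cache
termination_by n + 1 - cache.length
decreasing_by simp; omega

def sqMod (n : Nat) : Int :=
  -- `return cache[n]`: n < length after the loop, so getD with any default is exact
  (pvExtend pvCache0 n).getD n 0

-- loop body of A; state (zeros, questions, total); questions is a count A only ever
-- increments and uses as an index, kept as Nat
def stepA (s : Int × Nat × Int) (c : Char) : Int × Nat × Int :=
  let (zeros, questions, total) := s
  if c = '0' then (zeros + 1, questions, total)
  else
    let total := if c = '?' then total * 2 else total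
    let z := zeros * sqMod questions
    let q : Int := if questions ≠ 0 then (questions : Int) * sqMod (questions - 1) else 0
    let total := PySem.Int.mod (total + z + q) pvP
    let questions := if c = '?' then questions + 1 else questions
    (zeros, questions, total)

def inversions (n : String) : Int :=
  (n.toList.reverse.foldl stepA (0, 0, 0)).2.2

-- ===== PORT B =====
-- loop body of B; state (ones, qs, f10, mixed)
def stepB (s : Int × Nat × Int × Int) (c : Char) : Int × Nat × Int × Int :=
  let (ones, qs, f10, mixed) := s
  if c = '0' then (ones, qs, f10 + ones, mixed + (qs : Int))
  else if c = '?' then (ones, qs + 1, f10, mixed + ones)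
  else (ones + 1, qs, f10, mixed)

def inversions_alt (n : String) : Int :=
  let s := n.toList.foldl stepB (0, 0, 0, 0)
  let qs := s.2.1
  let f10 := s.2.2.1
  let mixed := s.2.2.2
  let total := f10 * PySem.Int.powMod 2 qs pvP
  let total := if 1 ≤ qs then total + mixed * PySem.Int.powMod 2 (qs - 1) pvP else total
  let total := if 2 ≤ qs then
      total + PySem.Int.floordiv ((qs : Int) * ((qs : Int) - 1)) 2 * PySem.Int.powMod 2 (qs - 2) pvP
    else total
  PySem.Int.mod total pvP

-- ===== PRECONDITION & SPEC =====
def Spec_inversions (n : String) (out : Int) : Prop := out = inversions_alt n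
instance (n : String) (out : Int) : Decidable (Spec_inversions n out) := by unfold Spec_inversions; infer_instance

-- ===== CLAIM (what is proved, stated in full; the proofs are below) =====
def Claim_equal_inversions : Prop := ∀ (n : String), Dom_inversions n → Spec_inversions n (inversions n)

-- ===== LEMMAS AND PROOFS =====
-- the Nat modulus
def pvPN : Nat := 1000000007
-- counts over the character list
def cZ : List Char → Nat
  | [] => 0
  | c :: l => cZ l + if c = '0' then 1 else 0
def cQ : List Char → Nat
  | [] => 0
  | c :: l => cQ l + if c = '?' then 1 else 0
def cOne : List Char → Nat
  | [] => 0
  | c :: l => cOne l + if c ≠ '0' ∧ c ≠ '?' then 1 else 0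
def cF10 : List Char → Nat
  | [] => 0
  | c :: l => cF10 l + if c ≠ '0' ∧ c ≠ '?' then cZ l else 0
def cMix : List Char → Nat
  | [] => 0
  | c :: l => cMix l + (if c = '?' then cZ l else 0) + (if c ≠ '0' ∧ c ≠ '?' then cQ l else 0)
-- A's accumulated total before any reduction mod pvPN
def pvTE : List Char → Nat
  | [] => 0
  | c :: l =>
    if c = '0' then pvTE l
    else (if c = '?' then 2 else 1) * pvTE l + cZ l * 2 ^ cQ l + cQ l * 2 ^ (cQ l - 1)

lemma cMix_eq_zero (l : List Char) (h : cQ l = 0) : cMix l = 0 := by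
  induction l with
  | nil => rfl
  | cons c l ih =>
    by_cases h0 : c = '?'
    · simp [cQ, h0] at h
    · simp [cQ, h0] at h
      simp [cMix, h0, ih h, h]

-- 2^i mod the modulus, as the cache stores it
def pvPow2 (i : Nat) : Int := ((2 ^ i % pvPN : Nat) : Int)

lemma pvP_cast : pvP = ((pvPN : Nat) : Int) := by decide

lemma pyGetD_last (m : Nat) (f : Nat → Int) (h : 1 ≤ m) :
    PySem.List.pyGetD ((List.range m).map f) (-1) 0 = f (m - 1) := by
  have h1 : PySem.List.pyIdx? ((List.range m).map f).length (-1) = some (m - 1) := by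
    rw [PySem.List.pyIdx?]
    rw [if_neg (by omega), if_pos (by simp; omega)]
    simp
  have h2 : m - 1 < m := by omega
  rw [PySem.List.pyGetD, PySem.List.pyGet?, h1]
  simp [h2]

lemma pvExtend_spec : ∀ (k m n : Nat), 1 ≤ m → n + 1 - m ≤ k →
    pvExtend ((List.range m).map pvPow2) n = (List.range (max m (n + 1))).map pvPow2 := by
  intro k
  induction k with
  | zero =>
    intro m n hm hk
    rw [pvExtend, if_neg (by simp; omega), Nat.max_eq_left (by omega)]
  | succ k ih =>
    intro m n hm hk
    by_cases hc : m ≤ n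
    · rw [pvExtend, if_pos (by simp; omega)]
      have hcell : PySem.Int.mod (PySem.List.pyGetD ((List.range m).map pvPow2) (-1) 0 * 2) pvP
          = pvPow2 m := by
        rw [pyGetD_last m pvPow2 hm, pvP_cast]
        have : pvPow2 (m - 1) * 2 = (((2 ^ (m - 1) % pvPN) * 2 : Nat) : Int) := by
          rw [pvPow2]; push_cast; ring
        rw [this, PySem.Int.mod_natCast, pvPow2]
        congr 1
        rw [Nat.mod_mul_mod, ← pow_succ, Nat.sub_add_cancel hm]
      rw [hcell]
      have hr : (List.range m).map pvPow2 ++ [pvPow2 m] = (List.range (m + 1)).map pvPow2 := by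
        rw [List.range_succ, List.map_append]; rfl
      rw [hr, ih (m + 1) n (by omega) (by omega),
        Nat.max_eq_right (by omega), Nat.max_eq_right (by omega)]
    · rw [pvExtend, if_neg (by simp; omega), Nat.max_eq_left (by omega)]

lemma sqMod_eq (k : Nat) : sqMod k = ((2 ^ k % pvPN : Nat) : Int) := by
  have hc : pvCache0 = (List.range 13).map pvPow2 := by decide
  have hk : k < max 13 (k + 1) := by omega
  rw [sqMod, hc, pvExtend_spec (k + 1) 13 k (by omega) (by omega)]
  simp [List.getD, hk]
  rfl

-- (?,?) pair count
def cP : List Char → Nat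
  | [] => 0
  | c :: l => cP l + if c = '?' then cQ l else 0

lemma cP_eq_zero (l : List Char) (h : cQ l ≤ 1) : cP l = 0 := by
  induction l with
  | nil => rfl
  | cons c l ih =>
    by_cases h0 : c = '?'
    · simp [cQ, h0] at h
      simp [cP, h0, ih (by omega), h]
    · simp [cQ, h0] at h
      simp [cP, h0, ih h]

lemma cP_closed (l : List Char) : cP l = cQ l * (cQ l - 1) / 2 := by
  induction l with
  | nil => rfl
  | cons c l ih =>
    by_cases h0 : c = '?'
    · simp only [cP, cQ, h0, if_pos, ih]
      rcases hc : cQ l with _ | r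
      · simp
      · have he : (r + 1 + 1) * (r + 1 + 1 - 1) = (r + 1) * (r + 1 - 1) + 2 * (r + 1) := by
          simp; ring
      
        rw [he, Nat.add_mul_div_left _ _ (by omega : 0 < 2)]
    · simp [cP, cQ, h0, ih]

-- closed form for pvTE
lemma pvTE_closed (l : List Char) :
    pvTE l = cF10 l * 2 ^ cQ l + cMix l * 2 ^ (cQ l - 1) + cP l * 2 ^ (cQ l - 2) := by
  induction l with
  | nil => rfl
  | cons c l ih =>
    by_cases h0 : c = '0'
    · simp [pvTE, cF10, cMix, cP, cQ, h0, ih]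
    · by_cases hq : c = '?'
      · simp only [pvTE, cF10, cMix, cP, cQ, h0, hq, ih, if_pos, if_neg, if_false,
          ite_true, ite_false, ne_eq, not_false_iff, and_self, if_true]
        simp [h0]
        rcases hQ : cQ l with _ | q
        · have hm1 : cMix l = 0 := cMix_eq_zero l hQ
          have hp : cP l = 0 := cP_eq_zero l (by omega)
          simp [hm1, hp]; ring
        · rcases q with _ | r
          · have hp : cP l = 0 := cP_eq_zero l (by omega)
            simp [hp]; ring
          · have e2 : r + 1 + 1 - 2 = r := by omega
            have e4 : r + 1 + 1 + 1 - 2 = r + 1 := by omega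
            simp only [Nat.add_sub_cancel, e2, e4, pow_succ]
            ring
      · simp [pvTE, cF10, cMix, cP, cQ, h0, hq, ih]
        ring

lemma powMod2 (k : Nat) : PySem.Int.powMod 2 k pvP = ((2 ^ k % pvPN : Nat) : Int) := by
  rw [PySem.Int.powMod, pvP_cast, show ((2 : Int) ^ k) = ((2 ^ k : Nat) : Int) by push_cast; rfl,
    PySem.Int.mod_natCast]

-- one non-'0' step of A, in terms of the exact (unreduced) total
lemma pvModStep (dN T Z Q : Nat) :
    PySem.Int.mod ((dN : Int) * ((T % pvPN : Nat) : Int) + (Z : Int) * sqMod Q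
        + (if Q ≠ 0 then (Q : Int) * sqMod (Q - 1) else 0)) pvP
      = (((dN * T + Z * 2 ^ Q + Q * 2 ^ (Q - 1)) % pvPN : Nat) : Int) := by
  rw [sqMod_eq]
  have hqt : (if Q ≠ 0 then (Q : Int) * sqMod (Q - 1) else 0)
      = (((if Q ≠ 0 then Q * (2 ^ (Q - 1) % pvPN) else 0 : Nat)) : Int) := by
    split <;> simp [sqMod_eq]
  rw [hqt]
  rw [show (dN : Int) * ((T % pvPN : Nat) : Int) + (Z : Int) * ((2 ^ Q % pvPN : Nat) : Int)
      + (((if Q ≠ 0 then Q * (2 ^ (Q - 1) % pvPN) else 0 : Nat)) : Int)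
      = ((dN * (T % pvPN) + Z * (2 ^ Q % pvPN)
          + (if Q ≠ 0 then Q * (2 ^ (Q - 1) % pvPN) else 0) : Nat) : Int) by push_cast; ring]
  rw [pvP_cast, PySem.Int.mod_natCast]
  congr 1
  have h1 : dN * (T % pvPN) ≡ dN * T [MOD pvPN] := (Nat.mod_modEq T pvPN).mul_left dN
  have h2 : Z * (2 ^ Q % pvPN) ≡ Z * 2 ^ Q [MOD pvPN] := (Nat.mod_modEq _ pvPN).mul_left Z
  have h3 : (if Q ≠ 0 then Q * (2 ^ (Q - 1) % pvPN) else 0) ≡ Q * 2 ^ (Q - 1) [MOD pvPN] := by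
    by_cases hQ0 : Q = 0
    · subst hQ0
      simp only [ne_eq, not_true_eq_false, if_false, zero_mul]
      rfl
    · rw [if_pos hQ0]; exact (Nat.mod_modEq _ pvPN).mul_left Q
  exact (h1.add h2).add h3

-- A's loop invariant
lemma foldA (l : List Char) :
    l.reverse.foldl stepA (0, 0, 0) = ((cZ l : Int), cQ l, ((pvTE l % pvPN : Nat) : Int)) := by
  induction l with
  | nil => simp [cZ, cQ, pvTE]
  | cons c l ih =>
    rw [List.reverse_cons, List.foldl_append, ih]
    by_cases h0 : c = '0'
    · subst h0
      simp only [List.foldl, stepA, Char.reduceEq, reduceIte, Prod.mk.injEq]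
      refine ⟨by simp [cZ], by simp [cQ], by simp [pvTE]⟩
    · by_cases hq : c = '?'
      · subst hq
        simp only [List.foldl, stepA, Char.reduceEq, reduceIte, Prod.mk.injEq]
        refine ⟨by simp [cZ], by simp [cQ], ?_⟩
        rw [show pvTE ('?' :: l) = 2 * pvTE l + cZ l * 2 ^ cQ l + cQ l * 2 ^ (cQ l - 1) by
            simp [pvTE]]
        have h := pvModStep 2 (pvTE l) (cZ l) (cQ l)
        rw [mul_comm ((pvTE l % pvPN : Nat) : Int) 2]
        exact_mod_cast h
      · simp only [List.foldl, stepA, if_neg h0, if_neg hq, Prod.mk.injEq]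
        refine ⟨by simp [cZ, h0], by simp [cQ, hq], ?_⟩
        rw [show pvTE (c :: l) = 1 * pvTE l + cZ l * 2 ^ cQ l + cQ l * 2 ^ (cQ l - 1) by
            simp [pvTE, h0, hq]]
        have h := pvModStep 1 (pvTE l) (cZ l) (cQ l)
        simp only [Nat.cast_one, one_mul] at h ⊢
        exact_mod_cast h

-- B's loop invariant
lemma foldB (l : List Char) (o f m : Int) (q : Nat) :
    l.foldl stepB (o, q, f, m) =
      (o + (cOne l : Int), q + cQ l, f + o * cZ l + cF10 l,
        m + q * cZ l + o * cQ l + cMix l) := by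
  induction l generalizing o f m q with
  | nil => simp [cOne, cQ, cZ, cF10, cMix]
  | cons c l ih =>
    by_cases h0 : c = '0'
    · simp [stepB, h0, ih, cOne, cQ, cZ, cF10, cMix]
      and_intros <;> first | omega | (push_cast; ring)
    · by_cases hq : c = '?'
      · simp [stepB, h0, hq, ih, cOne, cQ, cZ, cF10, cMix]
        and_intros <;> first | omega | (push_cast; ring)
      · simp [stepB, h0, hq, ih, cOne, cQ, cZ, cF10, cMix]
        and_intros <;> first | omega | (push_cast; ring)

lemma natmod3 (F M C a b c P : Nat) :
    (F * (a % P) + M * (b % P) + C * (c % P)) % P = (F * a + M * b + C * c) % P :=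
  (((Nat.mod_modEq a P).mul_left F).add ((Nat.mod_modEq b P).mul_left M)).add
    ((Nat.mod_modEq c P).mul_left C)

-- ===== VERDICT (by name: the statement is the Claim_ definition above) =====
theorem inversions_spec : Claim_equal_inversions := by
  unfold Claim_equal_inversions
  intro n _
  unfold Spec_inversions
  rw [inversions, inversions_alt]
  rw [foldA n.toList, foldB n.toList 0 0 0 0]
  simp only [zero_add, zero_mul, add_zero, Nat.cast_zero]
  rcases hQ : cQ n.toList with _ | q
  · rw [if_neg (by omega), if_neg (by omega), powMod2, pvTE_closed,
      cMix_eq_zero n.toList hQ, cP_eq_zero n.toList (by omega), hQ]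
    rw [show ((cF10 n.toList : Int)) * ((2 ^ 0 % pvPN : Nat) : Int)
        = ((cF10 n.toList * (2 ^ 0 % pvPN) : Nat) : Int) by push_cast; ring,
      pvP_cast, PySem.Int.mod_natCast]
    congr 1
  · rcases q with _ | r
    · rw [if_neg (by omega), if_pos (by omega), powMod2, powMod2, pvTE_closed,
        cP_eq_zero n.toList (by omega), hQ]
      rw [show ((cF10 n.toList : Int)) * ((2 ^ 1 % pvPN : Nat) : Int)
            + ((cMix n.toList : Int)) * ((2 ^ (1 - 1) % pvPN : Nat) : Int)
          = ((cF10 n.toList * (2 ^ 1 % pvPN) + cMix n.toList * (2 ^ (1 - 1) % pvPN) : Nat) : Int) by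
            push_cast; ring,
        pvP_cast, PySem.Int.mod_natCast]
      congr 1
    · rw [if_pos (by omega), if_pos (by omega), powMod2, powMod2, powMod2]
      rw [show ((r + 1 + 1 : Nat) : Int) * (((r + 1 + 1 : Nat) : Int) - 1)
          = (((r + 1 + 1) * (r + 1) : Nat) : Int) by push_cast; ring]
      rw [show (2 : Int) = ((2 : Nat) : Int) from rfl, PySem.Int.floordiv_natCast]
      rw [show ((cF10 n.toList : Int)) * ((2 ^ (r + 1 + 1) % pvPN : Nat) : Int)
            + ((cMix n.toList : Int)) * ((2 ^ (r + 1 + 1 - 1) % pvPN : Nat) : Int)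
            + (((r + 1 + 1) * (r + 1) / 2 : Nat) : Int) * ((2 ^ (r + 1 + 1 - 2) % pvPN : Nat) : Int)
          = ((cF10 n.toList * (2 ^ (r + 1 + 1) % pvPN)
              + cMix n.toList * (2 ^ (r + 1 + 1 - 1) % pvPN)
              + ((r + 1 + 1) * (r + 1) / 2) * (2 ^ (r + 1 + 1 - 2) % pvPN) : Nat) : Int) by
            push_cast; ring,
        pvP_cast, PySem.Int.mod_natCast]
      congr 1
      rw [pvTE_closed, hQ, cP_closed, hQ]
      simp only [Nat.add_sub_cancel]
      exact (natmod3 _ _ _ _ _ _ pvPN).symm
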